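-- pv_equiv track=rewrite | github.com/Ventrtom/RPI_Agent | agents/glaedr.py | _estimate_digest_counts
-- ===== SOURCE A (Python) =====
-- def _estimate_digest_counts(digest: str) -> tuple[int, int]:
--     """Estimate duplicate groups and tag sections from digest markdown."""
--     duplicates = 0
--     tags = 0
--     in_duplicates = False
--     in_tags = False
--     for line in digest.splitlines():
--         stripped = line.strip()
--         if stripped.startswith("## Potential Duplicates"):
--             in_duplicates = True
--             in_tags = False
--         elif stripped.startswith("## Suggested Tags"):
--             in_tags = True
--             in_duplicates = False
--         elif stripped.startswith("## "):
--             in_duplicates = False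
--             in_tags = False
--         elif in_duplicates and stripped.startswith("- Group"):
--             duplicates += 1
--         elif in_tags and stripped.startswith("### #"):
--             tags += 1
--     return duplicates, tags
-- ===== SOURCE B (Python) =====
-- def _estimate_digest_counts(digest: str) -> tuple[int, int]:
--     """Estimate duplicate groups and tag sections from digest markdown."""
--     sections = []
--     mode = "none"
--     body = []
--     for line in digest.splitlines():
--         s = line.strip()
--         if s.startswith("## "):
--             sections.append((mode, body))
--             body = []
--             if s.startswith("## Potential Duplicates"):
--                 mode = "dup"
--             elif s.startswith("## Suggested Tags"):
--                 mode = "tag"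
--             else:
--                 mode = "none"
--         else:
--             body.append(s)
--     sections.append((mode, body))
--     duplicates = sum(1 for m, b in sections if m == "dup" for x in b if x.startswith("- Group"))
--     tags = sum(1 for m, b in sections if m == "tag" for x in b if x.startswith("### #"))
--     return duplicates, tags
-- ===== Notes on version B (the rewrite author's own statement) =====
-- stated objective: alternative
-- what changed: Replaces A's single stateful scan with two in_duplicates/in_tags flags by a decomposition that first splits the lines into (mode, body) sections at each '## ' header and then declaratively sums the '- Group' lines of 'dup' sections and the '### #' lines of 'tag' sections.
import Mathlib
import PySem

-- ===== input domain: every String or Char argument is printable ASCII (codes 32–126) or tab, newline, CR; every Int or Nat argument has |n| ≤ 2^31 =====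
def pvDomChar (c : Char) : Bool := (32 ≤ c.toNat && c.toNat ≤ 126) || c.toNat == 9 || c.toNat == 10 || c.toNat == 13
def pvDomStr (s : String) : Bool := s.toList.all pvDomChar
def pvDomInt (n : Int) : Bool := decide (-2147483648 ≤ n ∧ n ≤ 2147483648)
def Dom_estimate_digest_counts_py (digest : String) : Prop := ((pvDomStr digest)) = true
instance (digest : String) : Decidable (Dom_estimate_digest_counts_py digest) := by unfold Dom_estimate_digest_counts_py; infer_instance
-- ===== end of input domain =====

-- B replaces A's two stateful section flags by a split-into-sections pass followed by two
-- declarative counts over the sections (objective: alternative decomposition, same cost).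

-- ===== PORT A =====
-- state: (duplicates, tags, in_duplicates, in_tags)
def pvAStep (st : Int × Int × Bool × Bool) (line : String) : Int × Int × Bool × Bool :=
  let s := PySem.Str.strip line
  if PySem.Str.startswith s "## Potential Duplicates" then (st.1, st.2.1, true, false)
  else if PySem.Str.startswith s "## Suggested Tags" then (st.1, st.2.1, false, true)
  else if PySem.Str.startswith s "## " then (st.1, st.2.1, false, false)
  else if st.2.2.1 && PySem.Str.startswith s "- Group" then (st.1 + 1, st.2.1, st.2.2.1, st.2.2.2)
  else if st.2.2.2 && PySem.Str.startswith s "### #" then (st.1, st.2.1 + 1, st.2.2.1, st.2.2.2)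
  else st

def estimate_digest_counts_py (digest : String) : Int × Int :=
  let r := (PySem.Str.splitlines digest).foldl pvAStep (0, 0, false, false)
  (r.1, r.2.1)

-- ===== PORT B =====
-- split the lines into sections: (mode, stripped body lines); each '## ' header starts a new one
def pvSections : List String → String → List String → List (String × List String)
  | [], mode, body => [(mode, body)]
  | line :: rest, mode, body =>
    let s := PySem.Str.strip line
    if PySem.Str.startswith s "## " then
      (mode, body) :: pvSections rest
        (if PySem.Str.startswith s "## Potential Duplicates" then "dup"
         else if PySem.Str.startswith s "## Suggested Tags" then "tag" else "none") []
    else pvSections rest mode (body ++ [s])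

-- sum over the sections of the given mode of the body lines starting with pfx
def pvCount (mode pfx : String) (secs : List (String × List String)) : Int :=
  (secs.map (fun sec =>
    if sec.1 == mode then ((sec.2.filter (fun x => PySem.Str.startswith x pfx)).length : Int) else 0)).sum

def estimate_digest_counts_py_alt (digest : String) : Int × Int :=
  let secs := pvSections (PySem.Str.splitlines digest) "none" []
  (pvCount "dup" "- Group" secs, pvCount "tag" "### #" secs)

-- ===== PRECONDITION & SPEC =====
def Spec_estimate_digest_counts_py (digest : String) (out : Int × Int) : Prop := out = estimate_digest_counts_py_alt digest
instance (digest : String) (out : Int × Int) : Decidable (Spec_estimate_digest_counts_py digest out) := by unfold Spec_estimate_digest_counts_py; infer_instance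

-- ===== CLAIM (what is proved, stated in full; the proofs are below) =====
def Claim_equal_estimate_digest_counts_py : Prop := ∀ (digest : String), Dom_estimate_digest_counts_py digest → Spec_estimate_digest_counts_py digest (estimate_digest_counts_py digest)

-- ===== LEMMAS AND PROOFS =====

def pvMode (inD inT : Bool) : String := if inD then "dup" else if inT then "tag" else "none"

def pvCnt (pfx : String) (body : List String) : Int :=
  ((body.filter (fun x => PySem.Str.startswith x pfx)).length : Int)

lemma pv_sw_imp (s p q : String) (hpq : p.toList <+: q.toList)
    (h : PySem.Str.startswith s q = true) : PySem.Str.startswith s p = true := by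
  simp only [PySem.Str.startswith_eq] at *
  exact (PySem.Chars.startswith_iff _ _).mpr (hpq.trans ((PySem.Chars.startswith_iff _ _).mp h))

lemma pvCount_cons (mode pfx m : String) (b : List String) (rest : List (String × List String)) :
    pvCount mode pfx ((m, b) :: rest) = (if m == mode then pvCnt pfx b else 0) + pvCount mode pfx rest := by
  simp [pvCount, pvCnt]

lemma pvCnt_append (pfx : String) (body : List String) (s : String) :
    pvCnt pfx (body ++ [s]) = pvCnt pfx body + (if PySem.Str.startswith s pfx then 1 else 0) := by
  simp only [pvCnt, List.filter_append, List.filter_cons, List.filter_nil]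
  split <;> simp

lemma pv_key (lines : List String) : ∀ (inD inT : Bool) (body : List String) (d t : Int),
    (inD && inT) = false →
    (let r := lines.foldl pvAStep (d, t, inD, inT); ((r.1 : Int), (r.2.1 : Int)))
      = (d - (if inD then pvCnt "- Group" body else 0)
            + pvCount "dup" "- Group" (pvSections lines (pvMode inD inT) body),
         t - (if inT then pvCnt "### #" body else 0)
            + pvCount "tag" "### #" (pvSections lines (pvMode inD inT) body)) := by
  induction lines with
  | nil =>
    intro inD inT body d t h
    cases inD <;> cases inT <;> simp_all [pvSections, pvCount, pvCnt, pvMode]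
  | cons line rest ih =>
    intro inD inT body d t h
    by_cases h1 : PySem.Str.startswith (PySem.Str.strip line) "## Potential Duplicates" = true
    · have h3 : PySem.Str.startswith (PySem.Str.strip line) "## " = true :=
        pv_sw_imp _ _ _ (by decide) h1
      have := ih true false [] d t rfl
      cases inD <;> cases inT <;>
        simp_all [List.foldl_cons, pvAStep, pvSections, pvCount_cons, pvMode, pvCnt] <;> omega
    · by_cases h2 : PySem.Str.startswith (PySem.Str.strip line) "## Suggested Tags" = true
      · have h3 : PySem.Str.startswith (PySem.Str.strip line) "## " = true :=
          pv_sw_imp _ _ _ (by decide) h2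
        have := ih false true [] d t rfl
        cases inD <;> cases inT <;>
          simp_all [List.foldl_cons, pvAStep, pvSections, pvCount_cons, pvMode, pvCnt] <;> omega
      · by_cases h3 : PySem.Str.startswith (PySem.Str.strip line) "## " = true
        · have := ih false false [] d t rfl
          cases inD <;> cases inT <;>
            simp_all [List.foldl_cons, pvAStep, pvSections, pvCount_cons, pvMode, pvCnt] <;> omega
        · -- not a header line: body grows by the stripped line
          cases inD with
          | true =>
            have hT : inT = false := by cases inT <;> simp_all
            subst hT
            by_cases h4 : PySem.Str.startswith (PySem.Str.strip line) "- Group" = true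
            · have := ih true false (body ++ [PySem.Str.strip line]) (d + 1) t rfl
              simp_all [List.foldl_cons, pvAStep, pvSections, pvMode, pvCnt_append]
            · have := ih true false (body ++ [PySem.Str.strip line]) d t rfl
              simp_all [List.foldl_cons, pvAStep, pvSections, pvMode, pvCnt_append]
          | false =>
            cases inT with
            | true =>
              by_cases h5 : PySem.Str.startswith (PySem.Str.strip line) "### #" = true
              · have := ih false true (body ++ [PySem.Str.strip line]) d (t + 1) rfl
                simp_all [List.foldl_cons, pvAStep, pvSections, pvMode, pvCnt_append]
              · have := ih false true (body ++ [PySem.Str.strip line]) d t rfl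
                simp_all [List.foldl_cons, pvAStep, pvSections, pvMode, pvCnt_append]
            | false =>
              have := ih false false (body ++ [PySem.Str.strip line]) d t rfl
              simp_all [List.foldl_cons, pvAStep, pvSections, pvMode]

-- ===== VERDICT (by name: the statement is the Claim_ definition above) =====
theorem estimate_digest_counts_py_spec : Claim_equal_estimate_digest_counts_py := by
  intro digest _
  unfold Spec_estimate_digest_counts_py estimate_digest_counts_py estimate_digest_counts_py_alt
  have := pv_key (PySem.Str.splitlines digest) false false [] 0 0 rfl
  simp only [pvMode, if_false, Bool.false_eq_true] at this
  simp only []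
  rw [Prod.ext_iff]
  constructor
  · have h1 := congrArg Prod.fst this; simpa using h1
  · have h2 := congrArg Prod.snd this; simpa using h2
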